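-- pv_equiv track=rewrite | github.com/dwj300/advent2017 | day7.py | _outlier
-- ===== SOURCE A (Python) =====
-- def _outlier(nodes):
--     counts = {}
--     for k in nodes:
--         if nodes[k] in counts:
--             counts[nodes[k]] += 1
--         else:
--             counts[nodes[k]] = 1
--
--     if len(counts.values()) == 1:
--         return (None, None)
--     Min = min(counts.values())
--     Max = max(counts.values())
--
--     for v in counts:
--         c = counts[v]
--         if c == Max:
--             common = v
--             break
--     for v in counts:
--         c = counts[v]
--         if c == Min:
--             n = v
--             break
--     for i in nodes:
--         if nodes[i] == v:
--             return i, common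
--     return (None, None)
-- ===== SOURCE B (Python) =====
-- def _outlier(nodes):
--     # One pass records counts and the first key seen for each value; the
--     # outliers are then read off the ends of a stable sort of the count table.
--     counts = {}
--     first_key = {}
--     for k in nodes:
--         v = nodes[k]
--         counts[v] = counts.get(v, 0) + 1
--         if v not in first_key:
--             first_key[v] = k
--     if len(counts) == 1:
--         return (None, None)
--     rare = sorted(counts.items(), key=lambda item: item[1])[0][0]
--     common = sorted(counts.items(), key=lambda item: -item[1])[0][0]
--     return (first_key[rare], common)
-- ===== Notes on version B (the rewrite author's own statement) =====
-- stated objective: alternative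
-- what changed: B makes one counting pass that also memoises each value's first key, then reads the rare and common values off the two ends of a stable sort of the count table, replacing A's separate max-scan, min-scan and final rescan of nodes; Pre_ excludes only the empty dict, on which A's min() raises ValueError.
import Mathlib
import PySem

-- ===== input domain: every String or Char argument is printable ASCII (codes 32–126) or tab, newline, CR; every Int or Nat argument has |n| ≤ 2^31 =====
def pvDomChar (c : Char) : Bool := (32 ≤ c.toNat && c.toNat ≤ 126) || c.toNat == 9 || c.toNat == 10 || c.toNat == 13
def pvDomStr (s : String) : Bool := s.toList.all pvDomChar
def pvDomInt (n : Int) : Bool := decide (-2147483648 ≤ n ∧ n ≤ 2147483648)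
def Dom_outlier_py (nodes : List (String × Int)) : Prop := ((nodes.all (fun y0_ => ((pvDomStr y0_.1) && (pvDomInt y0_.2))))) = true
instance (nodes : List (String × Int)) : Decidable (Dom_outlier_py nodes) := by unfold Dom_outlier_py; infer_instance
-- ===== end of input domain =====

-- B replaces A's three selection scans (max, min, rescan of nodes) by a single counting pass
-- that also memoises each value's first key, plus a stable sort of the count table read off at
-- its two ends (objective: alternative — sort-then-pick instead of scan-for-extrema).
-- ===== PORT A =====
-- the dict argument arrives as an association list; dict(...) semantics via PySem.Dict.ofList
def outlier_py (nodes : List (String × Int)) : Option String × Option Int :=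
  let d := PySem.Dict.ofList nodes
  -- for k in nodes: counts[nodes[k]] += 1 / = 1  (nodes[k] for a key k is its stored value)
  let counts : PySem.Dict Int Int :=
    d.items.foldl (fun c p => if c.contains p.2 then c.modify p.2 0 (· + 1) else c.insert p.2 1)
      PySem.Dict.empty
  if counts.values.length == 1 then (none, none)
  else
    match PySem.List.min? counts.values (fun x => x), PySem.List.max? counts.values (fun x => x) with
    | some mn, some mx =>
      -- the two break-loops over counts: first key with count == Max / == Min
      match counts.items.find? (fun p => p.2 == mx), counts.items.find? (fun p => p.2 == mn) with
      | some pc, some pv =>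
        -- for i in nodes: if nodes[i] == v: return i, common
        match d.items.find? (fun q => q.2 == pv.1) with
        | some qi => (some qi.1, some pc.1)
        | none => (none, none)
      | _, _ => (none, none)  -- unreachable (Python: the two break-loops always break)
    | _, _ => (none, none)    -- Python: min()/max() of empty raise ValueError; excluded by Pre_

-- ===== PORT B =====
def outlier_py_alt (nodes : List (String × Int)) : Option String × Option Int :=
  let d := PySem.Dict.ofList nodes
  -- one pass: counts[v] = counts.get(v, 0) + 1; if v not in first_key: first_key[v] = k
  let cf :=
    d.items.foldl
      (fun (cf : PySem.Dict Int Int × PySem.Dict Int String) p =>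
        (cf.1.insert p.2 (cf.1.getD p.2 0 + 1),
         if cf.2.contains p.2 then cf.2 else cf.2.insert p.2 p.1))
      (PySem.Dict.empty, PySem.Dict.empty)
  let counts := cf.1
  let firstKey := cf.2
  if counts.size == 1 then (none, none)
  else
    -- sorted(counts.items(), key=item[1])[0] and sorted(..., key=-item[1])[0]; [0] of the
    -- empty list (IndexError) and first_key[rare] (KeyError) are none, excluded by Pre_
    (((PySem.List.sorted counts.items (fun q => q.2) false).head?).bind
       (fun rp => firstKey.get? rp.1),
     ((PySem.List.sorted counts.items (fun q => -q.2) false).head?).map (fun cp => cp.1))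

-- ===== PRECONDITION & SPEC =====
-- Pre_ excludes only the empty dict, on which A's min() of no values raises ValueError.
def Pre_outlier_py (nodes : List (String × Int)) : Prop := nodes ≠ []
instance (nodes : List (String × Int)) : Decidable (Pre_outlier_py nodes) := by unfold Pre_outlier_py; infer_instance
def pvWitness_outlier_py : (List (String × Int)) := [("a", 1), ("b", 1), ("c", 2)]
def Spec_outlier_py (nodes : List (String × Int)) (out : Option String × Option Int) : Prop := out = outlier_py_alt nodes
instance (nodes : List (String × Int)) (out : Option String × Option Int) : Decidable (Spec_outlier_py nodes out) := by unfold Spec_outlier_py; infer_instance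

-- ===== CLAIM (what is proved, stated in full; the proofs are below) =====
def Claim_equal_outlier_py : Prop := ∀ (nodes : List (String × Int)), Dom_outlier_py nodes → Pre_outlier_py nodes → Spec_outlier_py nodes (outlier_py nodes)

-- ===== LEMMAS AND PROOFS =====

-- a fold whose pair state is updated componentwise is the pair of the component folds
theorem auxFoldPair {α β γ : Type} (fc : β → α → β) (fk : γ → α → γ) :
    ∀ (l : List α) (c0 : β) (k0 : γ),
      l.foldl (fun cf p => (fc cf.1 p, fk cf.2 p)) (c0, k0) = (l.foldl fc c0, l.foldl fk k0) := by
  intro l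
  induction l with
  | nil => intro c0 k0; rfl
  | cons p l ih => intro c0 k0; simpa using ih (fc c0 p) (fk k0 p)

-- the head of an insertBy fold from a nonempty accumulator is the strict-min-keeping fold of heads
theorem auxHeadFoldlInsertBy {α : Type} (f : α → Int) :
    ∀ (t : List α) (a : α) (as : List α),
      (t.foldl (fun acc x => PySem.List.insertBy (fun p q => decide (f p < f q)) x acc) (a :: as)).head?
        = some (t.foldl (fun h x => if f x < f h then x else h) a) := by
  intro t
  induction t with
  | nil => intro a as; rfl
  | cons x t ih =>
    intro a as
    simp only [List.foldl_cons, PySem.List.insertBy]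
    by_cases h : f x < f a <;> simp [h, ih]

-- a fold that replaces its candidate only on a STRICT decrease ends at the FIRST element
-- attaining the overall minimum M, which is also what find? (· == M) returns
theorem auxMinFoldFirst {α : Type} (f : α → Int) (M : Int) :
    ∀ (t : List α) (m : α), (∀ y ∈ t, M ≤ f y) → (f m = M ∨ M ∈ t.map f) → M ≤ f m →
      some (t.foldl (fun h x => if f x < f h then x else h) m)
        = if f m = M then some m else t.find? (fun v => f v == M) := by
  intro t
  induction t with
  | nil =>
    intro m _ hattain _
    simp only [List.map_nil, List.not_mem_nil, or_false] at hattain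
    simp [hattain]
  | cons x t ih =>
    intro m hle hattain hm
    have hxM : M ≤ f x := hle x (by simp)
    by_cases hmM : f m = M
    · have hnx : ¬ f x < f m := by rw [hmM]; exact not_lt.mpr hxM
      simp only [List.foldl_cons, if_neg hnx]
      rw [ih m (fun y hy => hle y (by simp [hy])) (Or.inl hmM) hm]
      simp [hmM]
    · by_cases hxMeq : f x = M
      · have hlt : f x < f m := by rw [hxMeq]; exact lt_of_le_of_ne hm (fun h => hmM h.symm)
        simp only [List.foldl_cons, if_pos hlt]
        rw [ih x (fun y hy => hle y (by simp [hy])) (Or.inl hxMeq) hxM]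
        simp [hxMeq, hmM]
      · have hattain' : M ∈ t.map f := by
          rcases hattain with h | h
          · exact absurd h hmM
          · simp only [List.map_cons, List.mem_cons] at h
            rcases h with h | h
            · exact absurd h.symm hxMeq
            · exact h
        have hfind : (x :: t).find? (fun v => f v == M) = t.find? (fun v => f v == M) := by
          simp [hxMeq]
        simp only [List.foldl_cons]
        by_cases hlt : f x < f m
        · rw [if_pos hlt, ih x (fun y hy => hle y (by simp [hy])) (Or.inr hattain') hxM]
          simp [hxMeq, hmM, hfind]
        · rw [if_neg hlt, ih m (fun y hy => hle y (by simp [hy])) (Or.inr hattain') hm]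
          simp [hmM, hfind]

-- head of a STABLE ascending sort = first element attaining the minimum key
theorem auxSortedHead {α : Type} (f : α → Int) (M : Int) (xs : List α)
    (hle : ∀ y ∈ xs, M ≤ f y) (hmem : M ∈ xs.map f) :
    (PySem.List.sorted xs f false).head? = xs.find? (fun x => f x == M) := by
  cases xs with
  | nil => simp at hmem
  | cons x t =>
    have hx : M ≤ f x := hle x (by simp)
    have hattain : f x = M ∨ M ∈ t.map f := by
      simp only [List.map_cons, List.mem_cons] at hmem
      rcases hmem with h | h
      · exact Or.inl h.symm
      · exact Or.inr h
    rw [PySem.List.sorted_eq_foldl_insertBy, List.foldl_cons]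
    have h0 : PySem.List.insertBy (fun p q => decide (f p < f q)) x ([] : List α) = [x] := rfl
    rw [h0, auxHeadFoldlInsertBy f t x []]
    rw [auxMinFoldFirst f M t x (fun y hy => hle y (by simp [hy])) hattain hx]
    by_cases h : f x = M <;> simp [h]

-- the first_key loop: lookup = first key of the scanned list holding the value
theorem auxFirstKey (v : Int) :
    ∀ (l : List (String × Int)) (g : PySem.Dict Int String),
      (l.foldl (fun g p => if g.contains p.2 then g else g.insert p.2 p.1) g).get? v
        = (g.get? v).or ((l.find? (fun p => p.2 == v)).map Prod.fst) := by
  intro l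
  induction l with
  | nil => intro g; cases h : g.get? v <;> simp [h, Option.or]
  | cons p l ih =>
    intro g
    simp only [List.foldl_cons]
    by_cases hc : g.contains p.2
    · rw [if_pos hc, ih g]
      by_cases hpv : p.2 = v
      · obtain ⟨w, hw⟩ : ∃ w, g.get? v = some w := by
          have : (g.get? v).isSome := by
            rw [← PySem.Dict.contains_eq_isSome_get?, ← hpv]; exact hc
          cases h : g.get? v with
          | none => rw [h] at this; simp at this
          | some w => exact ⟨w, rfl⟩
        simp [hw, Option.or]
      · simp [hpv]
    · rw [if_neg hc, ih (g.insert p.2 p.1)]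
      by_cases hpv : p.2 = v
      · have hg : g.get? v = none := by
          rw [PySem.Dict.get?_eq_none_iff_contains, ← hpv]
          simpa using hc
        rw [hpv, PySem.Dict.get?_insert_self, hg]
        simp [hpv, Option.or]
      · rw [PySem.Dict.get?_insert_of_ne g p.1 (Ne.symm hpv)]
        simp [hpv]

-- A's contains-branch is exactly Dict.insert of getD + 1 (both are Counter's step)
theorem auxBranchEqModify (c : PySem.Dict Int Int) (v : Int) :
    (if c.contains v then c.modify v 0 (· + 1) else c.insert v 1) = c.modify v 0 (· + 1) := by
  by_cases h : c.contains v
  · simp [h]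
  · simp only [Bool.not_eq_true] at h
    simp [h, PySem.Dict.modify, PySem.Dict.getD_of_not_contains (h := h)]

theorem auxInsertItemsNeNil {κ ν : Type} [BEq κ] (d : PySem.Dict κ ν) (k : κ) (v : ν) :
    (d.insert k v).items ≠ [] := by
  by_cases h : d.contains k
  · simp [PySem.Dict.insert, h]
    intro hc
    simp [PySem.Dict.contains, hc] at h
  · simp [PySem.Dict.insert, h]

theorem auxUpdateItemsNeNil {κ ν : Type} [BEq κ] :
    ∀ (ps : List (κ × ν)) (d : PySem.Dict κ ν), d.items ≠ [] ∨ ps ≠ [] → (d.update ps).items ≠ [] := by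
  intro ps
  induction ps with
  | nil => intro d h; simpa [PySem.Dict.update] using h.resolve_right (by simp)
  | cons p ps ih =>
    intro d _
    have h2 : d.update (p :: ps) = (d.insert p.1 p.2).update ps := by
      simp [PySem.Dict.update]
    rw [h2]
    exact ih _ (Or.inl (auxInsertItemsNeNil d p.1 p.2))

theorem auxMain (nodes : List (String × Int)) (hne : nodes ≠ []) :
    outlier_py nodes = outlier_py_alt nodes := by
  simp only [outlier_py, outlier_py_alt]
  set l := (PySem.Dict.ofList nodes).items with hl
  set vals := l.map (fun p => p.2) with hvals
  set S := PySem.Set.ofList vals with hSdef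
  set cntZ : Int → Int := fun v => ((vals.count v : Nat) : Int) with hcntZ
  -- split B's pair fold into its two independent folds
  have hpair : l.foldl
      (fun (cf : PySem.Dict Int Int × PySem.Dict Int String) p =>
        (cf.1.insert p.2 (cf.1.getD p.2 0 + 1),
         if cf.2.contains p.2 then cf.2 else cf.2.insert p.2 p.1))
      (PySem.Dict.empty, PySem.Dict.empty)
      = (l.foldl (fun c p => c.insert p.2 (c.getD p.2 0 + 1)) PySem.Dict.empty,
         l.foldl (fun g p => if g.contains p.2 then g else g.insert p.2 p.1) PySem.Dict.empty) :=
    auxFoldPair (fun (c : PySem.Dict Int Int) (p : String × Int) => c.insert p.2 (c.getD p.2 0 + 1))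
      (fun (g : PySem.Dict Int String) (p : String × Int) =>
        if g.contains p.2 then g else g.insert p.2 p.1) l PySem.Dict.empty PySem.Dict.empty
  rw [hpair]
  -- both count loops are Counter(values)
  have hcountsA : l.foldl
      (fun c p => if c.contains p.2 then c.modify p.2 0 (· + 1) else c.insert p.2 1)
      PySem.Dict.empty = PySem.Dict.counter vals := by
    rw [PySem.Dict.counter_eq_foldl, hvals, List.foldl_map]
    exact PySem.List.foldl_congr_mem l _ _ _ (fun c p _ => auxBranchEqModify c p.2)
  have hcountsB : l.foldl (fun c p => c.insert p.2 (c.getD p.2 0 + 1)) PySem.Dict.empty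
      = PySem.Dict.counter vals := by
    rw [← PySem.Dict.foldl_insert_getD_add_one_eq_counter vals, hvals, List.foldl_map]
  rw [hcountsA, hcountsB]
  have hitems : (PySem.Dict.counter vals).items = S.map (fun v => (v, cntZ v)) := by
    rw [PySem.Dict.items_counter, hSdef]
  have hvalues : (PySem.Dict.counter vals).values = S.map cntZ := by
    simp only [PySem.Dict.values, hitems, List.map_map]
    rfl
  have hsize : (PySem.Dict.counter vals).size = S.length := by
    simp only [PySem.Dict.size, hitems, List.length_map]
  rw [hvalues, hitems, hsize]
  -- nonemptiness
  have hlne : l ≠ [] := by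
    rw [hl]
    exact auxUpdateItemsNeNil nodes PySem.Dict.empty (Or.inr hne)
  have hvne : vals ≠ [] := by
    rw [hvals]
    simpa using hlne
  have hSne : S ≠ [] := by
    rcases List.exists_mem_of_ne_nil vals hvne with ⟨v, hv⟩
    intro h
    have : v ∈ S := by rw [hSdef]; exact (PySem.Set.mem_ofList vals v).mpr hv
    simp [h] at this
  by_cases hone : S.length = 1
  · simp [List.length_map, hone]
  · have hge2 : 2 ≤ S.length := by
      have : S.length ≠ 0 := by simpa [List.length_eq_zero_iff] using hSne
      omega
    have hcondA : ((S.map cntZ).length == 1) = false := by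
      simp [List.length_map]; omega
    have hcondB : (S.length == 1) = false := by simp; omega
    simp only [hcondA, hcondB, Bool.false_eq_true, if_false]
    -- the extreme counts mZ, MZ
    obtain ⟨MZ, hMZ⟩ : ∃ M, PySem.List.max? (S.map cntZ) (fun x => x) = some M := by
      cases h : PySem.List.max? (S.map cntZ) (fun x => x) with
      | none => exact absurd ((PySem.List.max?_eq_none_iff _ _).mp h) (by simp [hSne])
      | some M => exact ⟨M, rfl⟩
    obtain ⟨mZ, hmZ⟩ : ∃ M, PySem.List.min? (S.map cntZ) (fun x => x) = some M := by
      cases h : PySem.List.min? (S.map cntZ) (fun x => x) with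
      | none => exact absurd ((PySem.List.min?_eq_none_iff _ _).mp h) (by simp [hSne])
      | some M => exact ⟨M, rfl⟩
    have hMZle : ∀ v ∈ S, cntZ v ≤ MZ := fun v hv =>
      PySem.List.max?_isMax hMZ _ (List.mem_map_of_mem hv)
    have hmZle : ∀ v ∈ S, mZ ≤ cntZ v := fun v hv =>
      PySem.List.min?_isMin hmZ _ (List.mem_map_of_mem hv)
    have hMZmem : MZ ∈ S.map cntZ := PySem.List.max?_mem hMZ
    have hmZmem : mZ ∈ S.map cntZ := PySem.List.min?_mem hmZ
    -- first value attaining Max resp. Min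
    obtain ⟨c, hcfind⟩ : ∃ c, S.find? (fun v => cntZ v == MZ) = some c := by
      have : (S.find? (fun v => cntZ v == MZ)).isSome := by
        rw [List.find?_isSome]
        obtain ⟨v, hvS, hveq⟩ := List.mem_map.mp hMZmem
        exact ⟨v, hvS, by simp [hveq]⟩
      cases h : S.find? (fun v => cntZ v == MZ) with
      | none => rw [h] at this; simp at this
      | some c => exact ⟨c, rfl⟩
    obtain ⟨r, hrfind⟩ : ∃ r, S.find? (fun v => cntZ v == mZ) = some r := by
      have : (S.find? (fun v => cntZ v == mZ)).isSome := by
        rw [List.find?_isSome]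
        obtain ⟨v, hvS, hveq⟩ := List.mem_map.mp hmZmem
        exact ⟨v, hvS, by simp [hveq]⟩
      cases h : S.find? (fun v => cntZ v == mZ) with
      | none => rw [h] at this; simp at this
      | some r => exact ⟨r, rfl⟩
    -- A's two break-loops over counts.items
    have hAmax : (S.map (fun v => (v, cntZ v))).find? (fun p => p.2 == MZ)
        = some (c, cntZ c) := by
      rw [List.find?_map]
      have : ((fun p : Int × Int => p.2 == MZ) ∘ (fun v => (v, cntZ v)))
          = (fun v => cntZ v == MZ) := rfl
      rw [this, hcfind]
      rfl
    have hAmin : (S.map (fun v => (v, cntZ v))).find? (fun p => p.2 == mZ)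
        = some (r, cntZ r) := by
      rw [List.find?_map]
      have : ((fun p : Int × Int => p.2 == mZ) ∘ (fun v => (v, cntZ v)))
          = (fun v => cntZ v == mZ) := rfl
      rw [this, hrfind]
      rfl
    -- B's sorted heads: the same first-extremal items
    have hBrare : (PySem.List.sorted (S.map (fun v => (v, cntZ v)))
        (fun q : Int × Int => q.2) false).head? = some (r, cntZ r) := by
      rw [auxSortedHead (fun q : Int × Int => q.2) mZ _
          (by
            intro y hy
            obtain ⟨v, hvS, hveq⟩ := List.mem_map.mp hy
            rw [← hveq]
            exact hmZle v hvS)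
          (by
            simpa [List.map_map, Function.comp_def] using hmZmem)]
      exact hAmin
    have hBcommon : (PySem.List.sorted (S.map (fun v => (v, cntZ v)))
        (fun q : Int × Int => -q.2) false).head? = some (c, cntZ c) := by
      rw [auxSortedHead (fun q : Int × Int => -q.2) (-MZ) _
          (by
            intro y hy
            obtain ⟨v, hvS, hveq⟩ := List.mem_map.mp hy
            rw [← hveq]
            simpa using hMZle v hvS)
          (by
            obtain ⟨v, hvS, hveq⟩ := List.mem_map.mp hMZmem
            refine List.mem_map.mpr ⟨(v, cntZ v), List.mem_map_of_mem hvS, by simp [hveq]⟩)]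
      have hpred : (fun x : Int × Int => -x.2 == -MZ) = (fun x : Int × Int => x.2 == MZ) := by
        funext p
        by_cases h : p.2 = MZ <;> simp [h]
      rw [hpred]
      exact hAmax
    rw [hmZ, hMZ]
    simp only []
    rw [hAmax, hAmin]
    -- the final scan of A / B's first_key lookup: both the first l-pair holding value r
    have hrS : r ∈ S := List.mem_of_find?_eq_some hrfind
    have hrvals : r ∈ vals := (PySem.Set.mem_ofList vals r).mp (hSdef ▸ hrS)
    obtain ⟨q0, hq0⟩ : ∃ q0, l.find? (fun q => q.2 == r) = some q0 := by
      have : (l.find? (fun q => q.2 == r)).isSome := by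
        rw [List.find?_isSome]
        obtain ⟨p, hpl, hpr⟩ := List.mem_map.mp (hvals ▸ hrvals)
        exact ⟨p, hpl, by simp [hpr]⟩
      cases h : l.find? (fun q => q.2 == r) with
      | none => rw [h] at this; simp at this
      | some q0 => exact ⟨q0, rfl⟩
    have hFK : (l.foldl (fun g p => if g.contains p.2 then g else g.insert p.2 p.1)
        PySem.Dict.empty).get? r = some q0.1 := by
      rw [auxFirstKey r l PySem.Dict.empty, PySem.Dict.get?_empty, hq0]
      rfl
    simp [hBrare, hBcommon, hq0, hFK]

-- ===== VERDICT (by name: the statement is the Claim_ definition above) =====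
theorem outlier_py_spec : Claim_equal_outlier_py := by
  intro nodes _ hpre
  exact auxMain nodes hpre
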